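-- pv_equiv track=rewrite | github.com/bssrdf/pyleet | CountAnagrams.py | countAnagrams
-- ===== SOURCE A (Python) =====
-- from collections import Counter
-- from math import factorial
--
-- def countAnagrams(s: str) -> int:
--     mod = 10**9 + 7
--     def count(word):
--         cnt = Counter(word)
--         x = factorial(len(word))
--         for c in cnt:
--             x //= factorial(cnt[c])
--         return x
--     words = s.split()
--     ans = 1
--     for word in words:
--         ans = ans * count(word) % mod
--     return ans
-- ===== SOURCE B (Python) =====
-- def countAnagrams(s: str) -> int:
--     mod = 10**9 + 7
--     ans = 1
--     for word in s.split():
--         x = 1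
--         cnt = {}
--         for i, ch in enumerate(word, 1):
--             c = cnt.get(ch, 0) + 1
--             cnt[ch] = c
--             x = x * i // c
--         ans = ans * x % mod
--     return ans
-- ===== Notes on version B (the rewrite author's own statement) =====
-- stated objective: alternative
-- what changed: Per word, instead of computing factorial(len) and then dividing by the factorial of each distinct letter's count, B does one left-to-right pass maintaining the prefix multinomial coefficient (x = x * i // c, with c the running count of the current character), so no factorials are ever computed.
import Mathlib
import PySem

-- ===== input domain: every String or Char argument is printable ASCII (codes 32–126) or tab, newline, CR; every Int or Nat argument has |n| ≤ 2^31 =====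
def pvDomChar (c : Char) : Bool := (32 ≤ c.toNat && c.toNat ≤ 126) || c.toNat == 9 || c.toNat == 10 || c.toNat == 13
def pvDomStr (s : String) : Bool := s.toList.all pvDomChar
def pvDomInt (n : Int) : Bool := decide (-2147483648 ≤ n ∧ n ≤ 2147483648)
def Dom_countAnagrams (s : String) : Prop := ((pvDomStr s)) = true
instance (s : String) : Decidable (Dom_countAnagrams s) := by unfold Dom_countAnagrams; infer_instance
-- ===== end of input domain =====

-- B replaces A's per-word "factorial of the length, then divide by a factorial per distinct letter"
-- by a single left-to-right pass that maintains the multinomial coefficient of the prefix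
-- (x = x * i // c at the i-th character, c = running count of that character): an alternative
-- exact algorithm of similar cost that never computes a factorial.

-- ===== PORT A =====
-- math.factorial (argument here is always a nonnegative length/count)
def pyFact (n : Int) : Int := (Nat.factorial n.toNat : Int)

-- A's inner helper `count(word)`
def countWordA (word : String) : Int :=
  let cnt := PySem.Dict.counter word.toList
  cnt.keys.foldl (fun x c => PySem.Int.floordiv x (pyFact (cnt.getD c 0)))
    (pyFact (PySem.Str.len word))

def countAnagrams (s : String) : Int :=
  let md : Int := 10 ^ 9 + 7
  let words := PySem.Str.split₀ s
  words.foldl (fun ans word => PySem.Int.mod (ans * countWordA word) md) 1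

-- ===== PORT B =====
-- one iteration of B's inner loop: bump the running count of the character, x = x * i // c
def stepB (st : PySem.Dict Char Int × Int) (p : Int × Char) : PySem.Dict Char Int × Int :=
  let c := st.1.getD p.2 0 + 1
  (st.1.insert p.2 c, PySem.Int.floordiv (st.2 * p.1) c)

def countWordB (word : String) : Int :=
  ((PySem.List.enumerate word.toList 1).foldl stepB (PySem.Dict.empty, 1)).2

def countAnagrams_alt (s : String) : Int :=
  (PySem.Str.split₀ s).foldl
    (fun ans word => PySem.Int.mod (ans * countWordB word) 1000000007) 1

-- ===== PRECONDITION & SPEC =====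
def Spec_countAnagrams (s : String) (out : Int) : Prop := out = countAnagrams_alt s
instance (s : String) (out : Int) : Decidable (Spec_countAnagrams s out) := by unfold Spec_countAnagrams; infer_instance

-- ===== CLAIM (what is proved, stated in full; the proofs are below) =====
def Claim_equal_countAnagrams : Prop := ∀ (s : String), Dom_countAnagrams s → Spec_countAnagrams s (countAnagrams s)

-- ===== LEMMAS AND PROOFS =====

-- product of the factorials of the letter multiplicities of l
def Nfac (l : List Char) : Nat := ∏ c ∈ l.toFinset, (List.count c l).factorial

theorem Nfac_pos (l : List Char) : 0 < Nfac l :=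
  Finset.prod_pos (fun c _ => Nat.factorial_pos _)

theorem Nfac_dvd (l : List Char) : Nfac l ∣ l.length.factorial := by
  have h := Nat.prod_factorial_dvd_factorial_sum l.toFinset (fun c => List.count c l)
  rwa [List.sum_toFinset_count_eq_length] at h

theorem Nfac_append_singleton (l : List Char) (a : Char) :
    Nfac (l ++ [a]) = Nfac l * (List.count a l + 1) := by
  unfold Nfac
  by_cases h : a ∈ l
  · have hfin : (l ++ [a]).toFinset = l.toFinset := by
      ext c; simp; rintro rfl; exact h
    have ha : a ∈ l.toFinset := by simpa using h
    rw [hfin, ← Finset.mul_prod_erase l.toFinset _ ha,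
        ← Finset.mul_prod_erase l.toFinset (fun c => (List.count c l).factorial) ha]
    have hrest : ∏ c ∈ l.toFinset.erase a, (List.count c (l ++ [a])).factorial
        = ∏ c ∈ l.toFinset.erase a, (List.count c l).factorial := by
      refine Finset.prod_congr rfl (fun c hc => ?_)
      have hne : c ≠ a := (Finset.mem_erase.mp hc).1
      simp [List.count_append, Ne.symm hne]
    rw [hrest, List.count_append]
    simp [Nat.factorial_succ]
    ring
  · have hfin : (l ++ [a]).toFinset = insert a l.toFinset := by
      ext c; simp
    have ha : a ∉ l.toFinset := by simpa using h
    rw [hfin, Finset.prod_insert ha]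
    have hcnt : List.count a l = 0 := List.count_eq_zero.mpr h
    have hrest : ∏ c ∈ l.toFinset, (List.count c (l ++ [a])).factorial
        = ∏ c ∈ l.toFinset, (List.count c l).factorial := by
      refine Finset.prod_congr rfl (fun c hc => ?_)
      have hne : c ≠ a := by rintro rfl; exact ha hc
      simp [List.count_append, Ne.symm hne]
    rw [hrest, List.count_append, hcnt]
    simp

-- A's division loop over any key list, divisor by divisor
theorem foldA (f : Char → Nat) : ∀ (ks : List Char) (m : Nat),
    ((ks.map (fun c => (f c).factorial)).prod ∣ m) →
    ks.foldl (fun x c => PySem.Int.floordiv x ((f c).factorial : Int)) (m : Int)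
      = ((m / (ks.map (fun c => (f c).factorial)).prod : Nat) : Int)
  | [], m, _ => by simp
  | k :: ks, m, h => by
    simp only [List.map_cons, List.prod_cons] at h
    have h1 : (f k).factorial ∣ m := (dvd_mul_right _ _).trans h
    have h2 : (ks.map (fun c => (f c).factorial)).prod ∣ m / (f k).factorial :=
      (Nat.dvd_div_iff_mul_dvd h1).mpr h
    simp only [List.foldl_cons, PySem.Int.floordiv_natCast]
    rw [foldA f ks _ h2]
    simp only [List.map_cons, List.prod_cons]
    rw [Nat.div_div_eq_div_mul]

theorem countWordA_eq (w : String) :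
    countWordA w = ((w.toList.length.factorial / Nfac w.toList : Nat) : Int) := by
  unfold countWordA
  set l := w.toList with hl
  have hkeys : (PySem.Dict.counter l).keys = PySem.Set.ofList l := PySem.Dict.keys_counter l
  have hcongr : (PySem.Dict.counter l).keys.foldl
      (fun x c => PySem.Int.floordiv x (pyFact ((PySem.Dict.counter l).getD c 0)))
      (pyFact (PySem.Str.len w))
      = (PySem.Set.ofList l : List Char).foldl
      (fun x c => PySem.Int.floordiv x ((List.count c l).factorial : Int))
      (pyFact (PySem.Str.len w)) := by
    rw [hkeys]
    refine PySem.List.foldl_congr_mem _ _ _ _ (fun acc c _ => ?_)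
    rw [PySem.Dict.getD_counter]
    simp [pyFact]
  rw [hcongr]
  have hlen : pyFact (PySem.Str.len w) = ((l.length.factorial : Nat) : Int) := by
    rw [PySem.Str.len_eq]; simp [pyFact, hl]
  have hprod : ((PySem.Set.ofList l : List Char).map (fun c => (List.count c l).factorial)).prod
      = Nfac l := by
    have hfin : (PySem.Set.ofList l : List Char).toFinset = l.toFinset := by
      ext c; simp [PySem.Set.mem_ofList]
    rw [← List.prod_toFinset (fun c => (List.count c l).factorial) (PySem.Set.nodup_ofList l), hfin]
    rfl
  rw [hlen, foldA (fun c => List.count c l) _ _ (by rw [hprod]; exact Nfac_dvd l), hprod]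

-- one step of B's loop, at the level of natural numbers
theorem natStep (k cnt N : Nat) (hN0 : 0 < N) (hN : N ∣ k.factorial) :
    k.factorial / N * (1 + k) / (cnt + 1) = (k + 1).factorial / (N * (cnt + 1)) := by
  obtain ⟨q, hq⟩ := hN
  rw [hq, Nat.mul_div_cancel_left q hN0, Nat.factorial_succ, hq,
      show (k + 1) * (N * q) = N * (q * (1 + k)) by ring,
      Nat.mul_div_mul_left _ _ hN0]

-- the dict B maintains is Counter(prefix)
theorem insert_counter_step (l : List Char) (a : Char) :
    (PySem.Dict.counter l).insert a ((PySem.Dict.counter l).getD a 0 + 1)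
      = PySem.Dict.counter (l ++ [a]) := by
  have h := PySem.Dict.foldl_insert_getD_add_one_eq_counter (l ++ [a])
  rw [List.foldl_append, PySem.Dict.foldl_insert_getD_add_one_eq_counter] at h
  simpa using h

-- B's loop invariant: after a prefix l, the dict is Counter(l) and x is the multinomial of l
theorem foldB (l : List Char) :
    (PySem.List.enumerate l 1).foldl stepB (PySem.Dict.empty, 1)
      = (PySem.Dict.counter l, ((l.length.factorial / Nfac l : Nat) : Int)) := by
  induction l using List.reverseRecOn with
  | nil => simp [PySem.List.enumerate, Nfac, PySem.Dict.counter]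
  | append_singleton l a ih =>
    rw [PySem.List.enumerate_append, List.foldl_append, ih,
        PySem.List.enumerate_cons, PySem.List.enumerate_nil]
    simp only [List.foldl_cons, List.foldl_nil, stepB]
    rw [insert_counter_step, PySem.Dict.getD_counter]
    have hx : PySem.Int.floordiv
        (((l.length.factorial / Nfac l : Nat) : Int) * (1 + (l.length : Int)))
        (((List.count a l : Nat) : Int) + 1)
        = (((l ++ [a]).length.factorial / Nfac (l ++ [a]) : Nat) : Int) := by
      have hc : (((List.count a l : Nat) : Int) + 1) = ((List.count a l + 1 : Nat) : Int) := by
        push_cast; ring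
      have hm : (((l.length.factorial / Nfac l : Nat) : Int) * (1 + (l.length : Int)))
          = ((l.length.factorial / Nfac l * (1 + l.length) : Nat) : Int) := by
        push_cast; ring
      rw [hc, hm, PySem.Int.floordiv_natCast]
      rw [natStep l.length (List.count a l) (Nfac l) (Nfac_pos l) (Nfac_dvd l)]
      rw [Nfac_append_singleton]
      simp
    rw [hx]

theorem countWordB_eq (w : String) :
    countWordB w = ((w.toList.length.factorial / Nfac w.toList : Nat) : Int) := by
  unfold countWordB
  rw [foldB]

theorem countWord_eq (w : String) : countWordA w = countWordB w := by
  rw [countWordA_eq, countWordB_eq]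

-- ===== VERDICT (by name: the statement is the Claim_ definition above) =====
theorem countAnagrams_spec : Claim_equal_countAnagrams := by
  intro s _
  unfold Spec_countAnagrams countAnagrams countAnagrams_alt
  refine PySem.List.foldl_congr_mem _ _ _ _ (fun acc w _ => ?_)
  rw [countWord_eq]
  norm_num
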